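-- pv_equiv track=rewrite | github.com/Axonsin/RenderDocMCP_enhanced | renderdoc_extension/services/analysis_service.py | _diff_indexed_bindings
-- ===== SOURCE A (Python) =====
-- def _diff_indexed_bindings(left_map, right_map):
--     """Diff two indexed binding maps."""
--     added = []
--     removed = []
--     changed = []
--
--     all_keys = sorted(set(left_map.keys()) | set(right_map.keys()))
--     for key in all_keys:
--         left = left_map.get(key)
--         right = right_map.get(key)
--         if left is None:
--             added.append({"binding": key, "value": right})
--         elif right is None:
--             removed.append({"binding": key, "value": left})
--         elif left != right:
--             changed.append({
--                 "binding": key,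
--                 "event_a": left,
--                 "event_b": right,
--             })
--
--     return {
--         "added": added,
--         "removed": removed,
--         "changed": changed,
--     }
-- ===== SOURCE B (Python) =====
-- def _diff_indexed_bindings(left_map, right_map):
--     """Diff two indexed binding maps via a two-pointer merge of the key-sorted item lists."""
--     li = sorted(left_map.items(), key=lambda p: p[0])
--     ri = sorted(right_map.items(), key=lambda p: p[0])
--     added, removed, changed = [], [], []
--     i = j = 0
--     while i < len(li) and j < len(ri):
--         lk, lv = li[i]
--         rk, rv = ri[j]
--         if lk < rk:
--             removed.append({"binding": lk, "value": lv})
--             i += 1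
--         elif rk < lk:
--             added.append({"binding": rk, "value": rv})
--             j += 1
--         else:
--             if lv != rv:
--                 changed.append({"binding": lk, "event_a": lv, "event_b": rv})
--             i += 1
--             j += 1
--     removed.extend({"binding": k, "value": v} for k, v in li[i:])
--     added.extend({"binding": k, "value": v} for k, v in ri[j:])
--     return {"added": added, "removed": removed, "changed": changed}
-- ===== Notes on version B (the rewrite author's own statement) =====
-- stated objective: alternative
-- what changed: A builds one sorted union key set and classifies each key by two dict lookups; B never forms the union or looks keys up: it sorts each map's item list by key and classifies during a two-pointer merge of the two sorted lists, emitting trailing suffixes as pure removed/added runs.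
import Mathlib
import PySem

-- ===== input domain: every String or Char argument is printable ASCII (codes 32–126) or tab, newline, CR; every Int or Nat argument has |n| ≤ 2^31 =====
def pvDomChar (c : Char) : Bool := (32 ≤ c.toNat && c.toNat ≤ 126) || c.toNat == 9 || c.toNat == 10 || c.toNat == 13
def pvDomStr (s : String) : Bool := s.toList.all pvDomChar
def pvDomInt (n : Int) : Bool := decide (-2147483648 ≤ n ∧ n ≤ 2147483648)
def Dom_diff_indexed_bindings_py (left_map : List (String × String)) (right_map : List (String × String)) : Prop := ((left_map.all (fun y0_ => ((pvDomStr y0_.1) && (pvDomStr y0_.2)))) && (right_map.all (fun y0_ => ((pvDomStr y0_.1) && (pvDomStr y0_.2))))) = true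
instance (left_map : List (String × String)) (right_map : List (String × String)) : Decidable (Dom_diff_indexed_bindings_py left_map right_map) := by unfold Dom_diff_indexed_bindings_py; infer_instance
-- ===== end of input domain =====

-- B replaces A's sorted-key-union-plus-dict-lookup classification by a two-pointer merge
-- of the two key-sorted item lists (objective: alternative algorithm, same cost).

-- ===== PORT A =====
-- one loop over the sorted key union, pushing onto one of three accumulators
def diff_indexed_bindings_py (left_map : List (String × String)) (right_map : List (String × String)) : List (String × List (List (String × String))) :=
  let ld : PySem.Dict String String := PySem.Dict.ofList left_map
  let rd : PySem.Dict String String := PySem.Dict.ofList right_map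
  let all_keys : List String :=
    PySem.List.sorted (PySem.Set.union (PySem.Set.ofList (PySem.Dict.keys ld)) (PySem.Dict.keys rd)) (fun k => k) false
  let res :=
    all_keys.foldl (fun (acc : List (List (String × String)) × List (List (String × String)) × List (List (String × String))) key =>
      match PySem.Dict.get? ld key, PySem.Dict.get? rd key with
      | none, some right => (acc.1 ++ [[("binding", key), ("value", right)]], acc.2.1, acc.2.2)
      | some left, none => (acc.1, acc.2.1 ++ [[("binding", key), ("value", left)]], acc.2.2)
      | some left, some right =>
          if left ≠ right then (acc.1, acc.2.1, acc.2.2 ++ [[("binding", key), ("event_a", left), ("event_b", right)]])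
          else acc
      | none, none => acc)   -- unreachable: every key of the union is in one of the dicts
      ([], [], [])
  [("added", res.1), ("removed", res.2.1), ("changed", res.2.2)]

-- ===== PORT B =====
-- the while loop with pointers i, j of Source B, as a recursion on the two list suffixes;
-- the base cases are Source B's trailing extends over li[i:] / ri[j:]
def pvMergeDiff : List (String × String) → List (String × String) →
    List (List (String × String)) × List (List (String × String)) × List (List (String × String))
  | [], R => (R.map (fun p => [("binding", p.1), ("value", p.2)]), [], [])
  | L, [] => ([], L.map (fun p => [("binding", p.1), ("value", p.2)]), [])
  | (lk, lv) :: L, (rk, rv) :: R =>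
      if lk < rk then
        let t := pvMergeDiff L ((rk, rv) :: R)
        (t.1, [("binding", lk), ("value", lv)] :: t.2.1, t.2.2)
      else if rk < lk then
        let t := pvMergeDiff ((lk, lv) :: L) R
        ([("binding", rk), ("value", rv)] :: t.1, t.2.1, t.2.2)
      else
        let t := pvMergeDiff L R
        if lv ≠ rv then (t.1, t.2.1, [("binding", lk), ("event_a", lv), ("event_b", rv)] :: t.2.2)
        else t
termination_by L R => L.length + R.length

def diff_indexed_bindings_py_alt (left_map : List (String × String)) (right_map : List (String × String)) : List (String × List (List (String × String))) :=
  let li := PySem.List.sorted (PySem.Dict.ofList left_map).items (fun p => p.1) false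
  let ri := PySem.List.sorted (PySem.Dict.ofList right_map).items (fun p => p.1) false
  let t := pvMergeDiff li ri
  [("added", t.1), ("removed", t.2.1), ("changed", t.2.2)]

-- ===== PRECONDITION & SPEC =====
def Spec_diff_indexed_bindings_py (left_map : List (String × String)) (right_map : List (String × String)) (out : List (String × List (List (String × String)))) : Prop := out = diff_indexed_bindings_py_alt left_map right_map
instance (left_map : List (String × String)) (right_map : List (String × String)) (out : List (String × List (List (String × String)))) : Decidable (Spec_diff_indexed_bindings_py left_map right_map out) := by unfold Spec_diff_indexed_bindings_py; infer_instance

-- ===== CLAIM (what is proved, stated in full; the proofs are below) =====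
def Claim_equal_diff_indexed_bindings_py : Prop := ∀ (left_map : List (String × String)) (right_map : List (String × String)), Dom_diff_indexed_bindings_py left_map right_map → Spec_diff_indexed_bindings_py left_map right_map (diff_indexed_bindings_py left_map right_map)

-- ===== LEMMAS AND PROOFS =====

-- the three per-key classifiers, parametric in the two lookup functions
def pvAddF (fl fr : String → Option String) (k : String) : Option (List (String × String)) :=
  match fl k, fr k with
  | none, some r => some [("binding", k), ("value", r)]
  | _, _ => none

def pvRemF (fl fr : String → Option String) (k : String) : Option (List (String × String)) :=
  match fl k, fr k with
  | some l, none => some [("binding", k), ("value", l)]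
  | _, _ => none

def pvChgF (fl fr : String → Option String) (k : String) : Option (List (String × String)) :=
  match fl k, fr k with
  | some l, some r => if l ≠ r then some [("binding", k), ("event_a", l), ("event_b", r)] else none
  | _, _ => none

-- association-list lookup (first match), and the plain key merge of two key lists
def pvLk (L : List (String × String)) (k : String) : Option String :=
  (L.find? (fun p => p.1 == k)).map (·.2)

def pvKeyMerge : List String → List String → List String
  | [], ys => ys
  | xs, [] => xs
  | x :: xs, y :: ys =>
      if x < y then x :: pvKeyMerge xs (y :: ys)
      else if y < x then y :: pvKeyMerge (x :: xs) ys
      else x :: pvKeyMerge xs ys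
termination_by xs ys => xs.length + ys.length

theorem mem_pvKeyMerge (xs ys : List String) (k : String) :
    k ∈ pvKeyMerge xs ys ↔ k ∈ xs ∨ k ∈ ys := by
  fun_induction pvKeyMerge xs ys with
  | case1 ys => simp
  | case2 xs h => simp
  | case3 x xs y ys hlt ih => simp [ih]; tauto
  | case4 x xs y ys hlt hgt ih => simp [ih]; tauto
  | case5 x xs y ys hlt hgt ih =>
      have hxy : x = y := le_antisymm (le_of_not_gt hgt) (le_of_not_gt hlt)
      simp [ih, hxy]; tauto

theorem pairwise_pvKeyMerge (xs ys : List String)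
    (hx : xs.Pairwise (· < ·)) (hy : ys.Pairwise (· < ·)) :
    (pvKeyMerge xs ys).Pairwise (· < ·) := by
  fun_induction pvKeyMerge xs ys with
  | case1 ys => simpa only [pvKeyMerge] using hy
  | case2 xs h =>
      cases xs with
      | nil => exact absurd rfl h
      | cons a as => simpa only [pvKeyMerge] using hx
  | case3 x xs y ys hlt ih =>
      rw [List.pairwise_cons] at hx
      refine List.pairwise_cons.mpr ⟨?_, ih hx.2 hy⟩
      intro a ha
      rcases (mem_pvKeyMerge _ _ _).1 ha with h | h
      · exact hx.1 a h
      · rcases List.mem_cons.1 h with rfl | h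
        · exact hlt
        · exact lt_trans hlt ((List.pairwise_cons.1 hy).1 a h)
  | case4 x xs y ys hlt hgt ih =>
      rw [List.pairwise_cons] at hy
      refine List.pairwise_cons.mpr ⟨?_, ih hx hy.2⟩
      intro a ha
      rcases (mem_pvKeyMerge _ _ _).1 ha with h | h
      · rcases List.mem_cons.1 h with rfl | h
        · exact hgt
        · exact lt_trans hgt ((List.pairwise_cons.1 hx).1 a h)
      · exact hy.1 a h
  | case5 x xs y ys hlt hgt ih =>
      have hxy : x = y := le_antisymm (le_of_not_gt hgt) (le_of_not_gt hlt)
      rw [List.pairwise_cons] at hx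
      rw [List.pairwise_cons] at hy
      refine List.pairwise_cons.mpr ⟨?_, ih hx.2 hy.2⟩
      intro a ha
      rcases (mem_pvKeyMerge _ _ _).1 ha with h | h
      · exact hx.1 a h
      · exact hxy ▸ hy.1 a h

-- A's loop over any key list, with any two lookup functions, is the three filterMaps
theorem foldl_triple_eq_filterMaps (fl fr : String → Option String) (ks : List String)
    (a r c : List (List (String × String))) :
    ks.foldl (fun (acc : List (List (String × String)) × List (List (String × String)) × List (List (String × String))) key =>
      match fl key, fr key with
      | none, some right => (acc.1 ++ [[("binding", key), ("value", right)]], acc.2.1, acc.2.2)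
      | some left, none => (acc.1, acc.2.1 ++ [[("binding", key), ("value", left)]], acc.2.2)
      | some left, some right =>
          if left ≠ right then (acc.1, acc.2.1, acc.2.2 ++ [[("binding", key), ("event_a", left), ("event_b", right)]])
          else acc
      | none, none => acc)
      (a, r, c)
    = (a ++ ks.filterMap (pvAddF fl fr), r ++ ks.filterMap (pvRemF fl fr), c ++ ks.filterMap (pvChgF fl fr)) := by
  induction ks generalizing a r c with
  | nil => simp
  | cons k ks ih =>
    simp only [List.foldl_cons, List.filterMap_cons]
    rcases hl : fl k with _ | lv <;> rcases hr : fr k with _ | rv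
    · simpa [pvAddF, pvRemF, pvChgF, hl, hr] using ih a r c
    · simpa [pvAddF, pvRemF, pvChgF, hl, hr] using ih (a ++ [[("binding", k), ("value", rv)]]) r c
    · simpa [pvAddF, pvRemF, pvChgF, hl, hr] using ih a (r ++ [[("binding", k), ("value", lv)]]) c
    · by_cases h : lv = rv
      · simpa [pvAddF, pvRemF, pvChgF, hl, hr, h] using ih a r c
      · simpa [pvAddF, pvRemF, pvChgF, hl, hr, h] using ih a r (c ++ [[("binding", k), ("event_a", lv), ("event_b", rv)]])

-- pvLk facts
theorem pvLk_cons_self (k v : String) (L : List (String × String)) :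
    pvLk ((k, v) :: L) k = some v := by
  simp [pvLk]

theorem pvLk_cons_ne (q : String × String) (L : List (String × String)) (k : String)
    (hne : q.1 ≠ k) : pvLk (q :: L) k = pvLk L k := by
  simp [pvLk, hne]

theorem pvLk_not_mem (L : List (String × String)) (k : String)
    (h : k ∉ L.map Prod.fst) : pvLk L k = none := by
  have hnone : L.find? (fun p => p.1 == k) = none := by
    rw [List.find?_eq_none]
    intro p hp hbeq
    exact h (List.mem_map.mpr ⟨p, hp, by simpa using hbeq⟩)
  simp [pvLk, hnone]

theorem pvLk_mem (L : List (String × String)) (hnd : (L.map Prod.fst).Nodup)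
    (p : String × String) (hp : p ∈ L) : pvLk L p.1 = some p.2 := by
  induction L with
  | nil => cases hp
  | cons q L ih =>
    simp only [List.map_cons, List.nodup_cons] at hnd
    rcases List.mem_cons.1 hp with rfl | hp'
    · exact pvLk_cons_self p.1 p.2 L
    · have hne : q.1 ≠ p.1 := fun he => hnd.1 (he ▸ List.mem_map.mpr ⟨p, hp', rfl⟩)
      rw [pvLk_cons_ne _ _ _ hne]
      exact ih hnd.2 hp'

-- changing the two lookup functions pointwise on the key list changes nothing
theorem pvF_congr (fl fl' fr fr' : String → Option String) (ks : List String)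
    (h : ∀ k ∈ ks, fl k = fl' k ∧ fr k = fr' k) :
    ks.filterMap (pvAddF fl fr) = ks.filterMap (pvAddF fl' fr') ∧
    ks.filterMap (pvRemF fl fr) = ks.filterMap (pvRemF fl' fr') ∧
    ks.filterMap (pvChgF fl fr) = ks.filterMap (pvChgF fl' fr') := by
  refine ⟨List.filterMap_congr ?_, List.filterMap_congr ?_, List.filterMap_congr ?_⟩ <;>
    (intro k hk; simp only [pvAddF, pvRemF, pvChgF, (h k hk).1, (h k hk).2])

-- B's merge is the same three filterMaps, over the merged key list, with find?-lookups
theorem pvMergeDiff_eq_filterMaps (L R : List (String × String))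
    (hL : L.Pairwise (fun a b => a.1 < b.1)) (hR : R.Pairwise (fun a b => a.1 < b.1)) :
    pvMergeDiff L R =
      ((pvKeyMerge (L.map Prod.fst) (R.map Prod.fst)).filterMap (pvAddF (pvLk L) (pvLk R)),
       (pvKeyMerge (L.map Prod.fst) (R.map Prod.fst)).filterMap (pvRemF (pvLk L) (pvLk R)),
       (pvKeyMerge (L.map Prod.fst) (R.map Prod.fst)).filterMap (pvChgF (pvLk L) (pvLk R))) := by
  fun_induction pvMergeDiff L R with
  | case1 R =>
      have hnd : (R.map Prod.fst).Nodup :=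
        ((List.pairwise_map.mpr hR).imp (fun h => ne_of_lt h))
      rw [show pvKeyMerge (([] : List (String × String)).map Prod.fst) (R.map Prod.fst)
            = R.map Prod.fst by simp [pvKeyMerge]]
      refine Prod.ext ?_ (Prod.ext ?_ ?_) <;> simp only
      · rw [List.filterMap_map,
          List.filterMap_congr (g := fun p => some [("binding", p.1), ("value", p.2)])
            (fun p hp => by simp [Function.comp, pvAddF, pvLk_mem R hnd p hp, show pvLk [] p.1 = none from rfl])]
        simp
      · rw [List.filterMap_map,
          List.filterMap_congr (g := fun _ => none)
            (fun p hp => by simp [Function.comp, pvRemF, pvLk])]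
        simp
      · rw [List.filterMap_map,
          List.filterMap_congr (g := fun _ => none)
            (fun p hp => by simp [Function.comp, pvChgF, pvLk])]
        simp
  | case2 L h =>
      have hnd : (L.map Prod.fst).Nodup :=
        ((List.pairwise_map.mpr hL).imp (fun h => ne_of_lt h))
      have hkm : pvKeyMerge (L.map Prod.fst) (([] : List (String × String)).map Prod.fst)
          = L.map Prod.fst := by
        cases L with
        | nil => simp [pvKeyMerge]
        | cons a as => simp [pvKeyMerge]
      rw [hkm]
      refine Prod.ext ?_ (Prod.ext ?_ ?_) <;> simp only
      · rw [List.filterMap_map,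
          List.filterMap_congr (g := fun _ => none)
            (fun p hp => by simp [Function.comp, pvAddF, pvLk_mem L hnd p hp, show pvLk [] p.1 = none from rfl])]
        simp
      · rw [List.filterMap_map,
          List.filterMap_congr (g := fun p => some [("binding", p.1), ("value", p.2)])
            (fun p hp => by simp [Function.comp, pvRemF, pvLk_mem L hnd p hp, show pvLk [] p.1 = none from rfl])]
        simp
      · rw [List.filterMap_map,
          List.filterMap_congr (g := fun _ => none)
            (fun p hp => by simp [Function.comp, pvChgF, pvLk_mem L hnd p hp, show pvLk [] p.1 = none from rfl])]
        simp
  | case3 lk lv L rk rv R hlt t ih =>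
      have hLhd := (List.pairwise_cons.1 hL).1
      have hRhd := (List.pairwise_cons.1 hR).1
      have hfr : pvLk ((rk, rv) :: R) lk = none := by
        apply pvLk_not_mem
        simp only [List.map_cons, List.mem_cons]
        rintro (rfl | hm)
        · exact lt_irrefl _ hlt
        · rcases List.mem_map.1 hm with ⟨q, hq, rfl⟩
          exact lt_irrefl _ (lt_trans hlt (hRhd q hq))
      have hcg : ∀ k ∈ pvKeyMerge (L.map Prod.fst) (((rk, rv) :: R).map Prod.fst),
          pvLk ((lk, lv) :: L) k = pvLk L k ∧ pvLk ((rk, rv) :: R) k = pvLk ((rk, rv) :: R) k := by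
        intro k hk
        refine ⟨?_, rfl⟩
        apply pvLk_cons_ne
        rcases (mem_pvKeyMerge _ _ _).1 hk with h | h
        · rcases List.mem_map.1 h with ⟨q, hq, rfl⟩
          exact ne_of_lt (hLhd q hq)
        · simp only [List.map_cons, List.mem_cons] at h
          rcases h with rfl | h
          · exact ne_of_lt hlt
          · rcases List.mem_map.1 h with ⟨q, hq, rfl⟩
            exact ne_of_lt (lt_trans hlt (hRhd q hq))
      obtain ⟨hca, hcr, hcc⟩ := pvF_congr _ _ _ _ _ hcg
      have hA : pvAddF (pvLk ((lk, lv) :: L)) (pvLk ((rk, rv) :: R)) lk = none := by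
        simp [pvAddF, pvLk_cons_self, hfr]
      have hRm : pvRemF (pvLk ((lk, lv) :: L)) (pvLk ((rk, rv) :: R)) lk
          = some [("binding", lk), ("value", lv)] := by
        simp [pvRemF, pvLk_cons_self, hfr]
      have hC : pvChgF (pvLk ((lk, lv) :: L)) (pvLk ((rk, rv) :: R)) lk = none := by
        simp [pvChgF, pvLk_cons_self, hfr]
      rw [show pvKeyMerge (((lk, lv) :: L).map Prod.fst) (((rk, rv) :: R).map Prod.fst)
            = lk :: pvKeyMerge (L.map Prod.fst) (((rk, rv) :: R).map Prod.fst) by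
            simp only [List.map_cons]; rw [pvKeyMerge]; simp [hlt]]
      rw [List.filterMap_cons, List.filterMap_cons, List.filterMap_cons, hA, hRm, hC,
        hca, hcr, hcc,
        show t = pvMergeDiff L ((rk, rv) :: R) from rfl,
        ih (List.pairwise_cons.1 hL).2 hR]
  | case4 lk lv L rk rv R hlt hgt t ih =>
      have hLhd := (List.pairwise_cons.1 hL).1
      have hRhd := (List.pairwise_cons.1 hR).1
      have hfl : pvLk ((lk, lv) :: L) rk = none := by
        apply pvLk_not_mem
        simp only [List.map_cons, List.mem_cons]
        rintro (rfl | hm)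
        · exact lt_irrefl _ hgt
        · rcases List.mem_map.1 hm with ⟨q, hq, rfl⟩
          exact lt_irrefl _ (lt_trans hgt (hLhd q hq))
      have hcg : ∀ k ∈ pvKeyMerge (((lk, lv) :: L).map Prod.fst) (R.map Prod.fst),
          pvLk ((lk, lv) :: L) k = pvLk ((lk, lv) :: L) k ∧ pvLk ((rk, rv) :: R) k = pvLk R k := by
        intro k hk
        refine ⟨rfl, ?_⟩
        apply pvLk_cons_ne
        rcases (mem_pvKeyMerge _ _ _).1 hk with h | h
        · simp only [List.map_cons, List.mem_cons] at h
          rcases h with rfl | h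
          · exact ne_of_lt hgt
          · rcases List.mem_map.1 h with ⟨q, hq, rfl⟩
            exact ne_of_lt (lt_trans hgt (hLhd q hq))
        · rcases List.mem_map.1 h with ⟨q, hq, rfl⟩
          exact ne_of_lt (hRhd q hq)
      obtain ⟨hca, hcr, hcc⟩ := pvF_congr _ _ _ _ _ hcg
      have hA : pvAddF (pvLk ((lk, lv) :: L)) (pvLk ((rk, rv) :: R)) rk
          = some [("binding", rk), ("value", rv)] := by
        simp [pvAddF, pvLk_cons_self, hfl]
      have hRm : pvRemF (pvLk ((lk, lv) :: L)) (pvLk ((rk, rv) :: R)) rk = none := by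
        simp [pvRemF, pvLk_cons_self, hfl]
      have hC : pvChgF (pvLk ((lk, lv) :: L)) (pvLk ((rk, rv) :: R)) rk = none := by
        simp [pvChgF, pvLk_cons_self, hfl]
      rw [show pvKeyMerge (((lk, lv) :: L).map Prod.fst) (((rk, rv) :: R).map Prod.fst)
            = rk :: pvKeyMerge (((lk, lv) :: L).map Prod.fst) (R.map Prod.fst) by
            simp only [List.map_cons]; rw [pvKeyMerge]; simp [hlt, hgt]]
      rw [List.filterMap_cons, List.filterMap_cons, List.filterMap_cons, hA, hRm, hC,
        hca, hcr, hcc,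
        show t = pvMergeDiff ((lk, lv) :: L) R from rfl,
        ih hL (List.pairwise_cons.1 hR).2]
  | case5 lk lv L rk rv R hlt hgt t hv ih =>
      have hkey : lk = rk := le_antisymm (le_of_not_gt hgt) (le_of_not_gt hlt)
      subst hkey
      have hLhd := (List.pairwise_cons.1 hL).1
      have hRhd := (List.pairwise_cons.1 hR).1
      have hcg : ∀ k ∈ pvKeyMerge (L.map Prod.fst) (R.map Prod.fst),
          pvLk ((lk, lv) :: L) k = pvLk L k ∧ pvLk ((lk, rv) :: R) k = pvLk R k := by
        intro k hk
        have hne : lk ≠ k := by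
          rcases (mem_pvKeyMerge _ _ _).1 hk with h | h
          · rcases List.mem_map.1 h with ⟨q, hq, rfl⟩
            exact ne_of_lt (hLhd q hq)
          · rcases List.mem_map.1 h with ⟨q, hq, rfl⟩
            exact ne_of_lt (hRhd q hq)
        exact ⟨pvLk_cons_ne _ _ _ hne, pvLk_cons_ne _ _ _ hne⟩
      obtain ⟨hca, hcr, hcc⟩ := pvF_congr _ _ _ _ _ hcg
      have hA : pvAddF (pvLk ((lk, lv) :: L)) (pvLk ((lk, rv) :: R)) lk = none := by
        simp [pvAddF, pvLk_cons_self]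
      have hRm : pvRemF (pvLk ((lk, lv) :: L)) (pvLk ((lk, rv) :: R)) lk = none := by
        simp [pvRemF, pvLk_cons_self]
      have hC : pvChgF (pvLk ((lk, lv) :: L)) (pvLk ((lk, rv) :: R)) lk
          = some [("binding", lk), ("event_a", lv), ("event_b", rv)] := by
        simp [pvChgF, pvLk_cons_self, hv]
      rw [show pvKeyMerge (((lk, lv) :: L).map Prod.fst) (((lk, rv) :: R).map Prod.fst)
            = lk :: pvKeyMerge (L.map Prod.fst) (R.map Prod.fst) by
            simp only [List.map_cons]; rw [pvKeyMerge]; simp]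
      rw [List.filterMap_cons, List.filterMap_cons, List.filterMap_cons, hA, hRm, hC,
        hca, hcr, hcc,
        show t = pvMergeDiff L R from rfl,
        ih (List.pairwise_cons.1 hL).2 (List.pairwise_cons.1 hR).2]
  | case6 lk lv L rk rv R hlt hgt t hv ih =>
      have hkey : lk = rk := le_antisymm (le_of_not_gt hgt) (le_of_not_gt hlt)
      subst hkey
      have hveq : lv = rv := not_not.1 (by simpa using hv)
      subst hveq
      have hLhd := (List.pairwise_cons.1 hL).1
      have hRhd := (List.pairwise_cons.1 hR).1
      have hcg : ∀ k ∈ pvKeyMerge (L.map Prod.fst) (R.map Prod.fst),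
          pvLk ((lk, lv) :: L) k = pvLk L k ∧ pvLk ((lk, lv) :: R) k = pvLk R k := by
        intro k hk
        have hne : lk ≠ k := by
          rcases (mem_pvKeyMerge _ _ _).1 hk with h | h
          · rcases List.mem_map.1 h with ⟨q, hq, rfl⟩
            exact ne_of_lt (hLhd q hq)
          · rcases List.mem_map.1 h with ⟨q, hq, rfl⟩
            exact ne_of_lt (hRhd q hq)
        exact ⟨pvLk_cons_ne _ _ _ hne, pvLk_cons_ne _ _ _ hne⟩
      obtain ⟨hca, hcr, hcc⟩ := pvF_congr _ _ _ _ _ hcg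
      have hA : pvAddF (pvLk ((lk, lv) :: L)) (pvLk ((lk, lv) :: R)) lk = none := by
        simp [pvAddF, pvLk_cons_self]
      have hRm : pvRemF (pvLk ((lk, lv) :: L)) (pvLk ((lk, lv) :: R)) lk = none := by
        simp [pvRemF, pvLk_cons_self]
      have hC : pvChgF (pvLk ((lk, lv) :: L)) (pvLk ((lk, lv) :: R)) lk = none := by
        simp [pvChgF, pvLk_cons_self]
      rw [show pvKeyMerge (((lk, lv) :: L).map Prod.fst) (((lk, lv) :: R).map Prod.fst)
            = lk :: pvKeyMerge (L.map Prod.fst) (R.map Prod.fst) by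
            simp only [List.map_cons]; rw [pvKeyMerge]; simp]
      rw [List.filterMap_cons, List.filterMap_cons, List.filterMap_cons, hA, hRm, hC,
        hca, hcr, hcc,
        show t = pvMergeDiff L R from rfl,
        ih (List.pairwise_cons.1 hL).2 (List.pairwise_cons.1 hR).2]

-- the find?-lookup on a permutation of a nodup-keyed dict's items is Dict.get?
theorem pvLk_perm_items (d : PySem.Dict String String) (L : List (String × String))
    (hnd : d.keys.Nodup) (hperm : L.Perm d.items) (k : String) :
    pvLk L k = PySem.Dict.get? d k := by
  rcases h : L.find? (fun p => p.1 == k) with _ | p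
  · rw [List.find?_eq_none] at h
    have hk : k ∉ d.keys := by
      intro hkm
      have : k ∈ d.items.map Prod.fst := by simpa [PySem.Dict.keys] using hkm
      rcases List.mem_map.1 this with ⟨q, hq, rfl⟩
      exact h q (hperm.mem_iff.mpr hq) (by simp)
    rw [(PySem.Dict.get?_eq_none_iff_not_mem_keys d k).mpr hk]
    simp [pvLk, List.find?_eq_none.mpr h]
  · have hp := List.mem_of_find?_eq_some h
    have hpk : p.1 = k := by simpa using List.find?_some h
    have hv : PySem.Dict.get? d p.1 = some p.2 :=
      PySem.Dict.get?_of_mem_items d (k := p.1) (v := p.2) (by simpa using hperm.subset hp) hnd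
    rw [hpk] at hv
    rw [hv]
    simp [pvLk, h]

-- ===== VERDICT (by name: the statement is the Claim_ definition above) =====
theorem diff_indexed_bindings_py_spec : Claim_equal_diff_indexed_bindings_py := by
  intro left_map right_map _
  unfold Spec_diff_indexed_bindings_py diff_indexed_bindings_py diff_indexed_bindings_py_alt
  dsimp only
  rw [foldl_triple_eq_filterMaps]
  -- name the two dicts and the two sorted item lists
  have core : ∀ (d : PySem.Dict String String), d.keys.Nodup →
      ((PySem.List.sorted d.items (fun p => p.1) false).map Prod.fst).Perm d.keys ∧
      (PySem.List.sorted d.items (fun p => p.1) false).Pairwise (fun a b => a.1 < b.1) ∧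
      (∀ k, pvLk (PySem.List.sorted d.items (fun p => p.1) false) k = PySem.Dict.get? d k) := by
    intro d hnd
    have hperm : (PySem.List.sorted d.items (fun p => p.1) false).Perm d.items :=
      PySem.List.sorted_perm d.items (fun p => p.1) false
    have hmapperm : ((PySem.List.sorted d.items (fun p => p.1) false).map Prod.fst).Perm d.keys :=
      hperm.map Prod.fst
    have hndm : ((PySem.List.sorted d.items (fun p => p.1) false).map Prod.fst).Nodup :=
      (hmapperm.nodup_iff).mpr hnd
    have hle : ((PySem.List.sorted d.items (fun p => p.1) false).map (fun p => p.1)).Pairwise (· ≤ ·) :=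
      PySem.List.sorted_map_key_pairwise d.items (fun p => p.1)
    have hlt : ((PySem.List.sorted d.items (fun p => p.1) false).map Prod.fst).Pairwise (· < ·) :=
      (hle.and hndm).imp (fun h => lt_of_le_of_ne h.1 h.2)
    exact ⟨hmapperm, List.pairwise_map.1 hlt,
      fun k => pvLk_perm_items d _ hnd hperm k⟩
  obtain ⟨hpl, hwl, hfl⟩ := core (PySem.Dict.ofList left_map) (PySem.Dict.nodup_keys_ofList _)
  obtain ⟨hpr, hwr, hfr⟩ := core (PySem.Dict.ofList right_map) (PySem.Dict.nodup_keys_ofList _)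
  rw [pvMergeDiff_eq_filterMaps _ _ hwl hwr]
  have hfl' : pvLk (PySem.List.sorted (PySem.Dict.ofList left_map).items (fun p => p.1) false)
      = fun k => PySem.Dict.get? (PySem.Dict.ofList left_map) k := funext hfl
  have hfr' : pvLk (PySem.List.sorted (PySem.Dict.ofList right_map).items (fun p => p.1) false)
      = fun k => PySem.Dict.get? (PySem.Dict.ofList right_map) k := funext hfr
  rw [hfl', hfr']
  -- the sorted union key list IS the merged key list
  have hK : (pvKeyMerge
        ((PySem.List.sorted (PySem.Dict.ofList left_map).items (fun p => p.1) false).map Prod.fst)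
        ((PySem.List.sorted (PySem.Dict.ofList right_map).items (fun p => p.1) false).map Prod.fst)).Pairwise (· < ·) := by
    apply pairwise_pvKeyMerge
    · exact List.pairwise_map.2 hwl
    · exact List.pairwise_map.2 hwr
  have hKnd : (pvKeyMerge
        ((PySem.List.sorted (PySem.Dict.ofList left_map).items (fun p => p.1) false).map Prod.fst)
        ((PySem.List.sorted (PySem.Dict.ofList right_map).items (fun p => p.1) false).map Prod.fst)).Nodup :=
    hK.imp (fun h => ne_of_lt h)
  have hUnd : (PySem.Set.union (PySem.Set.ofList (PySem.Dict.keys (PySem.Dict.ofList left_map)))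
      (PySem.Dict.keys (PySem.Dict.ofList right_map))).Nodup :=
    PySem.Set.nodup_union _ _ (PySem.Set.nodup_ofList _)
  have hperm : (pvKeyMerge
        ((PySem.List.sorted (PySem.Dict.ofList left_map).items (fun p => p.1) false).map Prod.fst)
        ((PySem.List.sorted (PySem.Dict.ofList right_map).items (fun p => p.1) false).map Prod.fst)).Perm
      (PySem.Set.union (PySem.Set.ofList (PySem.Dict.keys (PySem.Dict.ofList left_map)))
        (PySem.Dict.keys (PySem.Dict.ofList right_map))) := by
    rw [List.perm_ext_iff_of_nodup hKnd hUnd]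
    intro a
    rw [mem_pvKeyMerge, PySem.Set.mem_union, PySem.Set.mem_ofList,
      hpl.mem_iff, hpr.mem_iff]
  rw [PySem.List.sorted_eq_of_perm_of_pairwise_lt _ _ (fun k => k) hperm (by simpa using hK)]
  simp
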